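-- pv_equiv track=rewrite | github.com/Ko-udon/Algorithm | 프로그래머스/2/131704. 택배상자/택배상자.py | solution
-- ===== SOURCE A (Python) =====
-- def solution(order):
--     answer = 0
--     stack = []
--     for i, o in enumerate(order):
--         stack.append(i+1) # 택배상자 1, 2 순으로 넣기
--         while stack and stack[-1] == order[answer]: # 스택이 비어있지 않고 제일 마지막 원소가 주문과 같으면
--             stack.pop()
--             answer +=1
--     return answer
-- ===== SOURCE B (Python) =====
-- def solution(order):
--     n = len(order)
--     stack = []
--     nxt = 1
--     answer = 0
--     for want in order:
--         while nxt <= n and (not stack or stack[-1] != want):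
--             stack.append(nxt)
--             nxt += 1
--         if stack and stack[-1] == want:
--             stack.pop()
--             answer += 1
--         else:
--             break
--     return answer
-- ===== Notes on version B (the rewrite author's own statement) =====
-- stated objective: alternative
-- what changed: B is a two-pointer simulation: per requested box an inner while pushes the next boxes until the stack top matches (or boxes run out), then pops once and breaks out early when permanently stuck, instead of A's one-push-per-index loop with a greedy multi-pop inner while indexed by the answer counter.
import Mathlib
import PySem

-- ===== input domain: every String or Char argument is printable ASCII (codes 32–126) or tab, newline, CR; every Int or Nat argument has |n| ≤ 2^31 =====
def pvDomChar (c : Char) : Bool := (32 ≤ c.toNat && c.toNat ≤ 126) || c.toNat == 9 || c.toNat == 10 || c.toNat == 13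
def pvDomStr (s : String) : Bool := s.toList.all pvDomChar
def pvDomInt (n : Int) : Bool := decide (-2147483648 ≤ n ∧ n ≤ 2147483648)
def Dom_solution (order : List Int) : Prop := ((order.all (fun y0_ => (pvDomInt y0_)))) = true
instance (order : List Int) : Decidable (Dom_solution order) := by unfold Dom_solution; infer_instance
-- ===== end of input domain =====

-- B replaces A's one-push-per-index loop (with its greedy answer-indexed pop loop) by a
-- two-pointer simulation: per wanted box an inner while pushes boxes until the stack top
-- matches, then pops once, breaking out early when stuck (objective: alternative decomposition).

-- ===== PORT A =====
-- the inner 'while stack and stack[-1] == order[answer]' loop; list head = Python stack[-1].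
-- order[answer] is ported as pyGet?; at every state A reaches, answer is in range whenever
-- the stack is nonempty, so the none (IndexError) case never fires there.
def popA (order : List Int) : List Int → Int → (List Int × Int)
  | [], a => ([], a)
  | t :: rest, a =>
      if PySem.List.pyGet? order a = some t then popA order rest (a + 1)
      else (t :: rest, a)

-- the 'for i, o in enumerate(order)' loop: one push of i+1 per element, then the pop loop
def loopA (order : List Int) : List Int → Int → List Int → Int → Int
  | [], _, _, answer => answer
  | _ :: rem, i, stack, answer =>
      let p := popA order ((i + 1) :: stack) answer
      loopA order rem (i + 1) p.1 p.2

def solution (order : List Int) : Int := loopA order order 0 [] 0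

-- ===== PORT B =====
-- inner 'while nxt <= n and (not stack or stack[-1] != want)'
def pushB (n want : Int) (stack : List Int) (nxt : Int) : List Int × Int :=
  if nxt ≤ n ∧ (stack = [] ∨ stack.head? ≠ some want) then pushB n want (nxt :: stack) (nxt + 1)
  else (stack, nxt)
termination_by (n + 1 - nxt).toNat
decreasing_by omega

-- the 'for want in order' loop with the early break
def goB (n : Int) : List Int → List Int → Int → Int → Int
  | [], _, _, answer => answer
  | w :: ws, stack, nxt, answer =>
      match pushB n w stack nxt with
      | (t :: rest, nxt') => if t = w then goB n ws rest nxt' (answer + 1) else answer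
      | ([], _) => answer

def solution_alt (order : List Int) : Int := goB (order.length : Int) order [] 1 0

-- ===== PRECONDITION & SPEC =====
def Spec_solution (order : List Int) (out : Int) : Prop := out = solution_alt order
instance (order : List Int) (out : Int) : Decidable (Spec_solution order out) := by unfold Spec_solution; infer_instance

-- ===== CLAIM (what is proved, stated in full; the proofs are below) =====
def Claim_equal_solution : Prop := ∀ (order : List Int), Dom_solution order → Spec_solution order (solution order)

-- ===== LEMMAS AND PROOFS =====

-- common reference: greedy simulation with cnt remaining boxes nxt, nxt+1, …
def gRef : Nat → Int → List Int → List Int → Int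
  | _, _, _, [] => 0
  | cnt, nxt, stack, w :: ws =>
    if stack.head? = some w then 1 + gRef cnt nxt stack.tail ws
    else match cnt with
      | 0 => 0
      | c + 1 => if nxt = w then 1 + gRef c (nxt + 1) stack ws
                 else gRef c (nxt + 1) (nxt :: stack) (w :: ws)
termination_by cnt _ _ ws => cnt + ws.length
decreasing_by all_goals (simp only [List.length_cons]; omega)


-- unfolding equations for gRef (defined by well-founded recursion)
theorem gRef_nil (cnt : Nat) (nxt : Int) (stack : List Int) : gRef cnt nxt stack [] = 0 := by
  rw [gRef.eq_def]

theorem gRef_cons_head (cnt : Nat) (nxt : Int) (stack : List Int) (w : Int) (ws : List Int)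
    (h : stack.head? = some w) :
    gRef cnt nxt stack (w :: ws) = 1 + gRef cnt nxt stack.tail ws := by
  rw [gRef.eq_def]; simp [h]

theorem gRef_cons_zero (nxt : Int) (stack : List Int) (w : Int) (ws : List Int)
    (h : stack.head? ≠ some w) : gRef 0 nxt stack (w :: ws) = 0 := by
  rw [gRef.eq_def]; simp [h]

theorem gRef_cons_eq (c : Nat) (nxt : Int) (stack : List Int) (w : Int) (ws : List Int)
    (h : stack.head? ≠ some w) (hw : nxt = w) :
    gRef (c + 1) nxt stack (w :: ws) = 1 + gRef c (nxt + 1) stack ws := by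
  rw [gRef.eq_def]; simp [h, hw]

theorem gRef_cons_ne (c : Nat) (nxt : Int) (stack : List Int) (w : Int) (ws : List Int)
    (h : stack.head? ≠ some w) (hw : nxt ≠ w) :
    gRef (c + 1) nxt stack (w :: ws) = gRef c (nxt + 1) (nxt :: stack) (w :: ws) := by
  rw [gRef.eq_def]; simp [h, hw]

theorem popA_le (order : List Int) : ∀ (stack : List Int) (a : Int),
    a ≤ (popA order stack a).2 := by
  intro stack
  induction stack with
  | nil => intro a; simp [popA]
  | cons t rest ih =>
      intro a
      by_cases h : PySem.List.pyGet? order a = some t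
      · simp only [popA, if_pos h]
        have := ih (a + 1); omega
      · simp [popA, if_neg h]

theorem popA_stuck (order : List Int) : ∀ (stack : List Int) (a : Int),
    popA order (popA order stack a).1 (popA order stack a).2 = popA order stack a := by
  intro stack
  induction stack with
  | nil => intro a; simp [popA]
  | cons t rest ih =>
      intro a
      by_cases h : PySem.List.pyGet? order a = some t
      · simp only [popA, if_pos h]; exact ih (a + 1)
      · simp [popA, if_neg h]

theorem get_of_drop_cons (order : List Int) (a : Int) (w : Int) (ws : List Int)
    (ha : 0 ≤ a) (hd : order.drop a.toNat = w :: ws) :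
    PySem.List.pyGet? order a = some w := by
  rw [PySem.List.pyGet?_of_nonneg order ha]
  have : (order.drop a.toNat)[0]? = some w := by rw [hd]; rfl
  simpa [List.getElem?_drop] using this

theorem drop_toNat_succ (order : List Int) (a : Int) (ha : 0 ≤ a) :
    order.drop (a + 1).toNat = (order.drop a.toNat).tail := by
  have : (a + 1).toNat = a.toNat + 1 := by omega
  rw [this, ← List.drop_drop, List.drop_one]

-- if A's pop loop is at a fixpoint, the stack top does not match the current want
theorem head_ne_of_stuck (order : List Int) (stack : List Int) (a : Int) (w : Int) (ws : List Int)
    (ha : 0 ≤ a) (hstuck : popA order stack a = (stack, a))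
    (hd : order.drop a.toNat = w :: ws) : stack.head? ≠ some w := by
  cases stack with
  | nil => simp
  | cons t rest =>
      simp only [List.head?_cons, ne_eq, Option.some.injEq]
      intro htw
      subst htw
      have hget := get_of_drop_cons order a t ws ha hd
      have h1 : popA order (t :: rest) a = popA order rest (a + 1) := by
        simp [popA, hget]
      have h2 := popA_le order rest (a + 1)
      rw [hstuck] at h1
      have : a = (popA order rest (a + 1)).2 := by rw [← h1]
      omega

-- A's multi-pop equals repeated branch-1 steps of gRef
theorem pop_g (order : List Int) : ∀ (stack : List Int) (a : Int) (cnt : Nat) (nxt : Int),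
    0 ≤ a →
    gRef cnt nxt stack (order.drop a.toNat)
      = ((popA order stack a).2 - a)
        + gRef cnt nxt (popA order stack a).1 (order.drop (popA order stack a).2.toNat) := by
  intro stack
  induction stack with
  | nil => intro a cnt nxt _; simp [popA]
  | cons t rest ih =>
      intro a cnt nxt ha
      by_cases h : PySem.List.pyGet? order a = some t
      · -- a pop happens
        have hlen : a.toNat < order.length := by
          have := PySem.List.pyGet?_of_nonneg order ha
          rw [this] at h
          exact (List.getElem?_eq_some_iff.mp h).1
        have hget : order[a.toNat] = t := by
          have := PySem.List.pyGet?_of_nonneg order ha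
          rw [this] at h
          exact (List.getElem?_eq_some_iff.mp h).2
        have hd : order.drop a.toNat = t :: order.drop (a.toNat + 1) :=
          List.drop_eq_getElem_cons hlen ▸ by rw [hget]
        have hd' : order.drop (a + 1).toNat = order.drop (a.toNat + 1) := by
          have : (a + 1).toNat = a.toNat + 1 := by omega
          rw [this]
        rw [hd]
        simp only [popA, if_pos h]
        have hih := ih (a + 1) cnt nxt (by omega)
        rw [hd'] at hih
        rw [gRef_cons_head cnt nxt (t :: rest) t _ (by simp)]
        simp only [List.tail_cons]
        have hle := popA_le order rest (a + 1)
        omega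
      · simp [popA, if_neg h]

-- at a stuck state with no boxes left, gRef returns 0
theorem g_stuck_zero (order : List Int) (stack : List Int) (a : Int) (nxt : Int)
    (ha : 0 ≤ a) (hstuck : popA order stack a = (stack, a)) :
    gRef 0 nxt stack (order.drop a.toNat) = 0 := by
  cases hd : order.drop a.toNat with
  | nil => rw [gRef_nil]
  | cons w ws =>
      have hne := head_ne_of_stuck order stack a w ws ha hstuck hd
      rw [gRef_cons_zero _ _ _ _ hne]

-- A's outer loop equals gRef, from any stuck state
theorem loopA_g (order : List Int) : ∀ (rem : List Int) (i : Int) (stack : List Int) (a : Int),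
    0 ≤ a → popA order stack a = (stack, a) →
    loopA order rem i stack a = a + gRef rem.length (i + 1) stack (order.drop a.toNat) := by
  intro rem
  induction rem with
  | nil =>
      intro i stack a ha hstuck
      rw [loopA]
      rw [List.length_nil, g_stuck_zero order stack a (i + 1) ha hstuck]
      omega
  | cons _ rem' ih =>
      intro i stack a ha hstuck
      cases hd : order.drop a.toNat with
      | nil =>
          -- no wants left: nothing ever pops again
          have hnone : PySem.List.pyGet? order a = none := by
            rw [PySem.List.pyGet?_of_nonneg order ha]
            exact List.getElem?_eq_none (List.drop_eq_nil_iff.mp hd)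
          have hp : popA order ((i + 1) :: stack) a = ((i + 1) :: stack, a) := by
            simp [popA, hnone]
          rw [loopA]
          simp only [hp]
          rw [ih (i + 1) ((i + 1) :: stack) a ha hp, hd]
          rw [gRef_nil, gRef_nil]
      | cons w ws =>
          have hget := get_of_drop_cons order a w ws ha hd
          have hne := head_ne_of_stuck order stack a w ws ha hstuck hd
          have hws : order.drop (a + 1).toNat = ws := by
            rw [drop_toNat_succ order a ha, hd]; rfl
          by_cases hiw : i + 1 = w
          · -- the pushed box matches: pop it, then continue the greedy pop loop
            have hp : popA order ((i + 1) :: stack) a = popA order stack (a + 1) := by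
              simp [popA, hget, ← hiw]
            rw [loopA]
            simp only [hp]
            have hq := popA_stuck order stack (a + 1)
            have hle := popA_le order stack (a + 1)
            rw [ih (i + 1) (popA order stack (a + 1)).1 (popA order stack (a + 1)).2
                  (by omega) hq]
            have hpg := pop_g order stack (a + 1) rem'.length (i + 1 + 1) (by omega)
            rw [hws] at hpg
            rw [List.length_cons, gRef_cons_eq _ _ _ _ _ hne hiw]
            omega
          · -- the pushed box does not match: it stays on the stack
            have hp : popA order ((i + 1) :: stack) a = ((i + 1) :: stack, a) := by
              have : ¬ PySem.List.pyGet? order a = some (i + 1) := by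
                rw [hget]; simp; omega
              simp [popA, this]
            rw [loopA]
            simp only [hp]
            rw [ih (i + 1) ((i + 1) :: stack) a ha hp, hd]
            rw [List.length_cons, gRef_cons_ne _ _ _ _ _ hne hiw]

-- B's loop equals gRef
theorem goB_g (n : Int) : ∀ (ws : List Int) (cnt : Nat) (nxt : Int) (stack : List Int)
    (answer : Int), nxt ≤ n + 1 → (n + 1 - nxt).toNat = cnt →
    goB n ws stack nxt answer = answer + gRef cnt nxt stack ws := by
  intro ws
  induction ws with
  | nil => intro cnt nxt stack answer _ _; rw [goB, gRef_nil]; omega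
  | cons w ws ihw =>
      intro cnt
      induction cnt with
      | zero =>
          intro nxt stack answer hle hcnt
          have hgt : ¬ nxt ≤ n := by omega
          have hp : pushB n w stack nxt = (stack, nxt) := by
            rw [pushB]; simp [hgt]
          cases stack with
          | nil =>
              simp only [goB, hp]
              rw [gRef_cons_zero _ _ _ _ (by simp)]
              omega
          | cons t rest =>
              by_cases htw : t = w
              · -- boxes exhausted but top matches: goB pops once, as does gRef's branch 1
                simp only [goB, hp, if_pos htw]
                rw [gRef_cons_head 0 nxt (t :: rest) w ws (by simp [htw])]
                simp only [List.tail_cons]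
                rw [ihw 0 nxt rest (answer + 1) hle hcnt]
                omega
              · simp only [goB, hp, if_neg htw]
                rw [gRef_cons_zero _ _ _ _ (by simp [htw])]
                omega
      | succ c ihc =>
          intro nxt stack answer hle hcnt
          have hnn : nxt ≤ n := by omega
          by_cases hhead : stack.head? = some w
          · -- top already matches: no push, one pop
            have hp : pushB n w stack nxt = (stack, nxt) := by
              rw [pushB]
              have : ¬ (nxt ≤ n ∧ (stack = [] ∨ stack.head? ≠ some w)) := by
                rintro ⟨_, h | h⟩
                · subst h; simp at hhead
                · exact h hhead
              simp [this]
            obtain ⟨t, rest, rfl⟩ : ∃ t rest, stack = t :: rest := by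
              cases stack with
              | nil => simp at hhead
              | cons t rest => exact ⟨t, rest, rfl⟩
            have htw : t = w := by simpa using hhead
            simp only [goB, hp, if_pos htw]
            rw [gRef_cons_head (c + 1) nxt (t :: rest) w ws hhead]
            simp only [List.tail_cons]
            rw [ihw (c + 1) nxt rest (answer + 1) hle hcnt]
            omega
          · by_cases hnw : nxt = w
            · -- push boxes up to want, which then matches and pops
              have hp : pushB n w stack nxt = (nxt :: stack, nxt + 1) := by
                rw [pushB, if_pos ⟨hnn, Or.inr hhead⟩, pushB]
                have : ¬ ((nxt + 1 ≤ n) ∧ ((nxt :: stack) = [] ∨ (nxt :: stack).head? ≠ some w)) := by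
                  rintro ⟨_, h | h⟩
                  · simp at h
                  · exact h (by simp [hnw])
                rw [if_neg this]
              simp only [goB, hp, if_pos hnw]
              rw [ihw c (nxt + 1) stack (answer + 1) (by omega) (by omega)]
              rw [gRef_cons_eq _ _ _ _ _ hhead hnw]
              omega
            · -- push one box and continue the inner while
              have hp : pushB n w stack nxt = pushB n w (nxt :: stack) (nxt + 1) := by
                rw [pushB]; rw [if_pos ⟨hnn, Or.inr hhead⟩]
              have hstep := ihc (nxt + 1) (nxt :: stack) answer (by omega) (by omega)
              simp only [goB, hp]
              simp only [goB] at hstep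
              rw [hstep]
              rw [gRef_cons_ne _ _ _ _ _ hhead hnw]

-- ===== VERDICT (by name: the statement is the Claim_ definition above) =====
theorem solution_spec : Claim_equal_solution := by
  intro order _
  unfold Spec_solution solution solution_alt
  have hA := loopA_g order order 0 [] 0 le_rfl (by simp [popA])
  have hB := goB_g (order.length : Int) order order.length 1 [] 0 (by omega) (by omega)
  simp only [Int.toNat_zero, List.drop_zero, zero_add] at hA hB
  rw [hA, hB]
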